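-- pv_equiv track=rewrite | github.com/KernAlan/pm-bench | tools/validate_answers.py | parse_provider_map
-- ===== SOURCE A (Python) =====
-- def parse_provider_map(s: str | None, models: list[str],
--                         default_provider: str) -> dict[str, str]:
--     if not s:
--         return {m: default_provider for m in models}
--     out: dict[str, str] = {}
--     for chunk in s.split(","):
--         chunk = chunk.strip()
--         if not chunk:
--             continue
--         if ":" not in chunk:
--             raise SystemExit(f"--provider-map entry must be 'model:provider', "
--                              f"got: {chunk!r}")
--         m, p = chunk.split(":", 1)
--         out[m.strip()] = p.strip()
--     for m in models:
--         out.setdefault(m, default_provider)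
--     return out
-- ===== SOURCE B (Python) =====
-- def parse_provider_map(s, models, default_provider):
--     out = {}
--     if s:
--         # single character-level pass: a small state machine over s + "," sentinel,
--         # accumulating the key/value of the current entry directly (no split/strip passes)
--         key, val, colon = [], [], False
--         for ch in s + ",":
--             if ch == ",":
--                 if colon:
--                     out["".join(key).strip()] = "".join(val).strip()
--                 else:
--                     bad = "".join(key).strip()
--                     if bad:
--                         raise SystemExit(f"--provider-map entry must be 'model:provider', "
--                                          f"got: {bad!r}")
--                 key, val, colon = [], [], False
--             elif colon:
--                 val.append(ch)
--             elif ch == ":":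
--                 colon = True
--             else:
--                 key.append(ch)
--     for m in models:
--         if m not in out:
--             out[m] = default_provider
--     return out
-- ===== Notes on version B (the rewrite author's own statement) =====
-- stated objective: alternative
-- what changed: B replaces A's split(',')/strip/split(':',1) passes with a single character-level state machine over s+',' that accumulates each entry's key and value directly and flushes at commas, and fills defaults with an explicit membership-test loop instead of setdefault.
import Mathlib
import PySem

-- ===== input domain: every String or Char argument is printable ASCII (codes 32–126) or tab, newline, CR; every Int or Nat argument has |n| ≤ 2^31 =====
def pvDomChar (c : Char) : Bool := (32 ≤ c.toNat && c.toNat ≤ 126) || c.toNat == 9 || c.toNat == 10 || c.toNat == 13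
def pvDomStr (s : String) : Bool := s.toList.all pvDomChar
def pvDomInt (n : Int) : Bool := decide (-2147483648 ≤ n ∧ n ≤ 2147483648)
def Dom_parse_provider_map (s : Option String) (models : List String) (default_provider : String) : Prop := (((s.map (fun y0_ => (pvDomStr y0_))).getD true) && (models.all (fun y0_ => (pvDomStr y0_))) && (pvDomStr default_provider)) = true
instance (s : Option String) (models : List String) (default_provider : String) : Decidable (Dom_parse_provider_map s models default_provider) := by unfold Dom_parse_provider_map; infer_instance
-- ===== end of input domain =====

-- B replaces A's split/strip/split(':',1) passes with a single character-level state machine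
-- over s + ',' that accumulates each entry's key and value directly and flushes at commas.

-- ===== PORT A =====
-- the Python line `m, p = chunk.split(":", 1)`; the fallback arm is Python's ValueError,
-- unreachable when ":" is in c (Pre_ guarantees it).
def pySplit2 (c : String) : String × String :=
  match PySem.Str.splitMax? c ":" 1 with
  | some (m :: p :: _) => (m, p)
  | _ => (c, "")

def ppmA_body (d : PySem.Dict String String) (chunk : String) : PySem.Dict String String :=
  let c := PySem.Str.strip chunk
  if c = "" then d
  else if PySem.Str.isIn ":" c = false then d  -- Python: raise SystemExit; excluded by Pre_
  else
    let mp := pySplit2 c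
    d.insert (PySem.Str.strip mp.1) (PySem.Str.strip mp.2)

def parse_provider_map (s : Option String) (models : List String) (default_provider : String) : List (String × String) :=
  match s with
  | none => (PySem.Dict.ofList (models.map (fun m => (m, default_provider)))).items
  | some str =>
    if str = "" then (PySem.Dict.ofList (models.map (fun m => (m, default_provider)))).items
    else
      let out := ((PySem.Str.split? str ",").getD []).foldl ppmA_body PySem.Dict.empty
      (models.foldl (fun d m => d.setdefault m default_provider) out).items

-- ===== PORT B =====
-- one scanner transition for a non-comma character ch on the state (key, val, colon)
def ppmB_scan1 (kvc : List Char × List Char × Bool) (ch : Char) : List Char × List Char × Bool :=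
  if kvc.2.2 then (kvc.1, kvc.2.1 ++ [ch], true)
  else if ch = ':' then (kvc.1, kvc.2.1, true)
  else (kvc.1 ++ [ch], kvc.2.1, kvc.2.2)

-- the flush performed at a comma ("".join + strip; the no-colon arm with a non-empty
-- stripped key is Python's raise SystemExit, excluded by Pre_)
def ppmB_flush (out : PySem.Dict String String) (kvc : List Char × List Char × Bool) :
    PySem.Dict String String :=
  if kvc.2.2 then
    out.insert (String.ofList (PySem.Chars.strip kvc.1)) (String.ofList (PySem.Chars.strip kvc.2.1))
  else out

def ppmB_step (st : PySem.Dict String String × (List Char × List Char × Bool)) (ch : Char) :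
    PySem.Dict String String × (List Char × List Char × Bool) :=
  if ch = ',' then (ppmB_flush st.1 st.2, ([], [], false))
  else (st.1, ppmB_scan1 st.2 ch)

def parse_provider_map_alt (s : Option String) (models : List String) (default_provider : String) : List (String × String) :=
  let out : PySem.Dict String String :=
    match s with
    | none => PySem.Dict.empty
    | some str =>
      if str = "" then PySem.Dict.empty
      else ((str.toList ++ [',']).foldl ppmB_step (PySem.Dict.empty, ([], [], false))).1
  (models.foldl (fun d m => if d.contains m = true then d else d.insert m default_provider) out).items

-- ===== PRECONDITION & SPEC =====
-- Pre_ excludes exactly the inputs where A raises SystemExit: a non-empty s containing a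
-- comma-chunk that strips to a non-empty string without a ':'.
def Pre_parse_provider_map (s : Option String) (models : List String) (default_provider : String) : Prop :=
  s.getD "" = "" ∨ ∀ c ∈ (PySem.Str.split? (s.getD "") ",").getD [],
    PySem.Str.strip c = "" ∨ PySem.Str.isIn ":" (PySem.Str.strip c) = true
instance (s : Option String) (models : List String) (default_provider : String) : Decidable (Pre_parse_provider_map s models default_provider) := by unfold Pre_parse_provider_map; infer_instance

def pvWitness_parse_provider_map : Option String × List String × String :=
  (some "gpt4 : openai, claude:anthropic ,", ["gpt4", "llama", "gpt4"], "groq")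

def Spec_parse_provider_map (s : Option String) (models : List String) (default_provider : String) (out : List (String × String)) : Prop := out = parse_provider_map_alt s models default_provider
instance (s : Option String) (models : List String) (default_provider : String) (out : List (String × String)) : Decidable (Spec_parse_provider_map s models default_provider out) := by unfold Spec_parse_provider_map; infer_instance

-- ===== CLAIM (what is proved, stated in full; the proofs are below) =====
def Claim_equal_parse_provider_map : Prop := ∀ (s : Option String) (models : List String) (default_provider : String), Dom_parse_provider_map s models default_provider → Pre_parse_provider_map s models default_provider → Spec_parse_provider_map s models default_provider (parse_provider_map s models default_provider)

-- ===== LEMMAS AND PROOFS =====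

-- recursive characterization of splitting on a single comma
def pvSplit1 : List Char → List (List Char)
  | [] => [[]]
  | c :: r => if c = ',' then [] :: pvSplit1 r else (pvSplit1 r).modifyHead (c :: ·)

lemma pvSplit1_ne_nil (l : List Char) : pvSplit1 l ≠ [] := by
  cases l with
  | nil => simp [pvSplit1]
  | cons c r =>
    simp only [pvSplit1]
    split_ifs
    · simp
    · have := pvSplit1_ne_nil r
      cases h : pvSplit1 r with
      | nil => exact absurd h this
      | cons a t => simp [List.modifyHead]

lemma pv_splitOn_go_comma (fuel : Nat) (l cur : List Char) (acc : List (List Char))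
    (h : l.length < fuel) :
    PySem.Chars.splitOn.go [','] fuel l cur acc
      = acc.reverse ++ (pvSplit1 l).modifyHead (cur.reverse ++ ·) := by
  induction fuel generalizing l cur acc with
  | zero => omega
  | succ fuel ih =>
    cases l with
    | nil => simp [PySem.Chars.splitOn.go, pvSplit1]
    | cons c rest =>
      by_cases hc : c = ','
      · subst hc
        have hpre : List.isPrefixOf [','] (',' :: rest) = true := by
          simp [List.isPrefixOf]
        rw [PySem.Chars.splitOn.go]
        simp only [hpre, if_true, List.length_cons, List.length_nil, List.drop_succ_cons,
          List.drop_zero]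
        rw [ih rest [] (cur.reverse :: acc) (by simpa using Nat.lt_of_succ_lt_succ h)]
        simp [pvSplit1, List.modifyHead]
        cases hs : pvSplit1 rest with
        | nil => exact absurd hs (pvSplit1_ne_nil rest)
        | cons a t => simp [List.modifyHead]
      · have hpre : List.isPrefixOf [','] (c :: rest) = false := by
          simp [List.isPrefixOf]
          exact fun hb => absurd hb.symm hc
        rw [PySem.Chars.splitOn.go]
        simp only [hpre, Bool.false_eq_true, if_false]
        rw [ih rest (c :: cur) acc (by simpa using Nat.lt_of_succ_lt_succ h)]
        simp only [pvSplit1, if_neg hc]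
        cases hs : pvSplit1 rest with
        | nil => exact absurd hs (pvSplit1_ne_nil rest)
        | cons a t => simp [List.modifyHead]

lemma pv_splitOn_comma (l : List Char) :
    PySem.Chars.splitOn l [','] = pvSplit1 l := by
  unfold PySem.Chars.splitOn
  rw [pv_splitOn_go_comma (l.length + 1) l [] [] (by omega)]
  cases hs : pvSplit1 l with
  | nil => exact absurd hs (pvSplit1_ne_nil l)
  | cons a t => simp [List.modifyHead]

-- splitOnMax.go with the split budget exhausted
lemma pv_splitOnMax_go_zero (fuel : Nat) (l cur : List Char) (acc : List (List Char)) :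
    PySem.Chars.splitOnMax.go [':'] fuel 0 l cur acc
      = acc.reverse ++ [cur.reverse ++ l] := by
  cases fuel with
  | zero => simp [PySem.Chars.splitOnMax.go]
  | succ fuel =>
    cases l with
    | nil => simp [PySem.Chars.splitOnMax.go]
    | cons c rest => simp [PySem.Chars.splitOnMax.go]

-- splitOnMax.go with sep ':' and one split left
lemma pv_splitOnMax_go_one (fuel : Nat) (l cur : List Char) (acc : List (List Char))
    (h : l.length < fuel) :
    PySem.Chars.splitOnMax.go [':'] fuel 1 l cur acc
      = acc.reverse ++ (if ':' ∈ l then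
          [cur.reverse ++ l.takeWhile (fun c => c != ':'), (l.dropWhile (fun c => c != ':')).tail]
        else [cur.reverse ++ l]) := by
  induction fuel generalizing l cur acc with
  | zero => omega
  | succ fuel ih =>
    cases l with
    | nil => simp [PySem.Chars.splitOnMax.go]
    | cons c rest =>
      by_cases hc : c = ':'
      · subst hc
        have hpre : List.isPrefixOf [':'] (':' :: rest) = true := by simp [List.isPrefixOf]
        rw [PySem.Chars.splitOnMax.go]
        simp only [Nat.one_ne_zero, if_false, hpre, if_true, List.drop_succ_cons, List.drop_zero]
        rw [pv_splitOnMax_go_zero]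
        simp [List.takeWhile, List.dropWhile]
      · have hpre : List.isPrefixOf [':'] (c :: rest) = false := by
          simp [List.isPrefixOf]
          exact fun hb => absurd hb.symm hc
        rw [PySem.Chars.splitOnMax.go]
        simp only [Nat.one_ne_zero, if_false, hpre, Bool.false_eq_true]
        rw [ih rest (c :: cur) acc (by simpa using Nat.lt_of_succ_lt_succ h)]
        have hmem : (':' ∈ c :: rest) = (':' ∈ rest) := by simp [eq_comm, hc, Ne.symm hc]
        by_cases hr : ':' ∈ rest
        · simp [hr, hc, List.takeWhile_cons, List.dropWhile_cons, hmem]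
        · simp [hr, hc, hmem]

lemma pv_splitOnMax_colon (cs : List Char) (h : ':' ∈ cs) :
    PySem.Chars.splitOnMax cs [':'] 1
      = [cs.takeWhile (fun c => c != ':'), (cs.dropWhile (fun c => c != ':')).tail] := by
  unfold PySem.Chars.splitOnMax
  rw [if_neg (by omega), show (1 : Int).toNat = 1 from rfl]
  rw [pv_splitOnMax_go_one (cs.length + 1) cs [] [] (by omega)]
  simp [h]

-- basic dropWhile facts
lemma pv_dropWhile_idem {α : Type} (p : α → Bool) (l : List α) :
    (l.dropWhile p).dropWhile p = l.dropWhile p := by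
  induction l with
  | nil => rfl
  | cons a l ih =>
    by_cases hp : p a = true
    · simpa [List.dropWhile_cons, hp] using ih
    · simp [List.dropWhile_cons, hp]

lemma pv_mem_dropWhile {α : Type} (p : α → Bool) (x : α) (l : List α)
    (hx : p x = false) (hm : x ∈ l) : x ∈ l.dropWhile p := by
  induction l with
  | nil => simp at hm
  | cons a l ih =>
    by_cases hp : p a = true
    · rw [List.dropWhile_cons_of_pos hp]
      rcases List.mem_cons.mp hm with rfl | hm'
      · rw [hp] at hx; simp at hx
      · exact ih hm'
    · rw [List.dropWhile_cons_of_neg hp]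
      exact hm

lemma pv_dropWhile_append_cons {α : Type} (p : α → Bool) (y z : List α) (x : α)
    (hx : p x = false) :
    (y ++ x :: z).dropWhile p = y.dropWhile p ++ x :: z := by
  rw [List.dropWhile_append]
  by_cases he : (y.dropWhile p).isEmpty = true
  · simp [he, List.dropWhile_cons, hx, List.isEmpty_iff.mp he]
  · simp [he]

lemma pv_takeWhile_append_all {α : Type} (p : α → Bool) (y z : List α) (x : α)
    (hx : p x = false) (hy : ∀ a ∈ y, p a = true) :
    (y ++ x :: z).takeWhile p = y := by
  induction y with
  | nil => simp [List.takeWhile_cons, hx]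
  | cons a y ih =>
    have ha := hy a (by simp)
    simp only [List.cons_append, List.takeWhile_cons, ha, if_true]
    rw [ih (fun b hb => hy b (by simp [hb]))]

lemma pv_dropWhile_append_all {α : Type} (p : α → Bool) (y z : List α) (x : α)
    (hx : p x = false) (hy : ∀ a ∈ y, p a = true) :
    (y ++ x :: z).dropWhile p = x :: z := by
  induction y with
  | nil => simp [List.dropWhile_cons, hx]
  | cons a y ih =>
    have ha := hy a (by simp)
    simp only [List.cons_append, List.dropWhile_cons, ha, if_true]
    exact ih (fun b hb => hy b (by simp [hb]))

lemma pv_isspace_colon : PySem.Chars.isspace ':' = false := by decide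

-- strip algebra
lemma pv_lstrip_append_colon (a b : List Char) :
    PySem.Chars.lstrip (a ++ ':' :: b) = PySem.Chars.lstrip a ++ ':' :: b := by
  unfold PySem.Chars.lstrip
  exact pv_dropWhile_append_cons _ a b ':' pv_isspace_colon

lemma pv_rstrip_append_colon (a b : List Char) :
    PySem.Chars.rstrip (a ++ ':' :: b) = a ++ ':' :: PySem.Chars.rstrip b := by
  unfold PySem.Chars.rstrip
  have : (a ++ ':' :: b).reverse = b.reverse ++ ':' :: a.reverse := by simp
  rw [this, pv_dropWhile_append_cons _ _ _ ':' pv_isspace_colon]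
  simp

lemma pv_rstrip_append_of_ne_nil (y z : List Char) (hz : PySem.Chars.rstrip z ≠ []) :
    PySem.Chars.rstrip (y ++ z) = y ++ PySem.Chars.rstrip z := by
  unfold PySem.Chars.rstrip at *
  rw [List.reverse_append, List.dropWhile_append]
  by_cases he : ((z.reverse).dropWhile PySem.Chars.isspace).isEmpty = true
  · exact absurd (by simp [List.isEmpty_iff.mp he]) hz
  · simp [he]

lemma pv_rstrip_idem (l : List Char) :
    PySem.Chars.rstrip (PySem.Chars.rstrip l) = PySem.Chars.rstrip l := by
  unfold PySem.Chars.rstrip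
  rw [List.reverse_reverse, pv_dropWhile_idem]

lemma pv_lstrip_rstrip_comm (b : List Char) :
    PySem.Chars.lstrip (PySem.Chars.rstrip b) = PySem.Chars.rstrip (PySem.Chars.lstrip b) := by
  cases h : List.dropWhile PySem.Chars.isspace b with
  | nil =>
    have hall : ∀ x ∈ b, PySem.Chars.isspace x = true :=
      fun x hx => List.dropWhile_eq_nil_iff.mp h x hx
    have hrev : PySem.Chars.rstrip b = [] := by
      unfold PySem.Chars.rstrip
      rw [List.dropWhile_eq_nil_iff.mpr (fun x hx => hall x (List.mem_reverse.mp hx))]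
      rfl
    have hl : PySem.Chars.lstrip b = [] := h
    rw [hrev, hl]
    rfl
  | cons c r =>
    have hlb : PySem.Chars.lstrip b = c :: r := h
    have hb : b = b.takeWhile PySem.Chars.isspace ++ c :: r := by
      conv_lhs => rw [← List.takeWhile_append_dropWhile (p := PySem.Chars.isspace) (l := b)]
      rw [h]
    have hsp : ∀ a ∈ b.takeWhile PySem.Chars.isspace, PySem.Chars.isspace a = true :=
      fun a ha => List.mem_takeWhile_imp ha
    have hc : PySem.Chars.isspace c = false := by
      have hne : List.dropWhile PySem.Chars.isspace b ≠ [] := by simp [h]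
      have := List.head_dropWhile_not PySem.Chars.isspace (l := b) hne
      simpa [h] using this
    by_cases hr : PySem.Chars.rstrip r = []
    · have hral : List.dropWhile PySem.Chars.isspace r.reverse = [] := by
        have := hr
        unfold PySem.Chars.rstrip at this
        exact List.reverse_eq_nil_iff.mp this
      have hcr : PySem.Chars.rstrip (c :: r) = [c] := by
        unfold PySem.Chars.rstrip
        rw [List.reverse_cons, List.dropWhile_append, hral]
        simp [List.dropWhile_cons, hc]
      rw [hb, pv_rstrip_append_of_ne_nil _ _ (by rw [hcr]; simp), hcr]
      unfold PySem.Chars.lstrip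
      rw [pv_dropWhile_append_all _ _ _ c hc hsp, pv_dropWhile_append_all _ _ _ c hc hsp, hcr]
    · have hcr : PySem.Chars.rstrip (c :: r) = c :: PySem.Chars.rstrip r := by
        have : (c :: r) = [c] ++ r := rfl
        rw [this, pv_rstrip_append_of_ne_nil [c] r hr]
        rfl
      rw [hb, pv_rstrip_append_of_ne_nil _ _ (by rw [hcr]; simp), hcr]
      unfold PySem.Chars.lstrip
      rw [pv_dropWhile_append_all _ _ _ c hc hsp, pv_dropWhile_append_all _ _ _ c hc hsp, hcr]

lemma pv_strip_rstrip (b : List Char) :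
    PySem.Chars.strip (PySem.Chars.rstrip b) = PySem.Chars.strip b := by
  unfold PySem.Chars.strip
  rw [pv_lstrip_rstrip_comm, pv_rstrip_idem]

lemma pv_lstrip_idem (l : List Char) :
    PySem.Chars.lstrip (PySem.Chars.lstrip l) = PySem.Chars.lstrip l := by
  unfold PySem.Chars.lstrip
  exact pv_dropWhile_idem _ l

lemma pv_strip_lstrip (a : List Char) :
    PySem.Chars.strip (PySem.Chars.lstrip a) = PySem.Chars.strip a := by
  unfold PySem.Chars.strip
  rw [pv_lstrip_idem]

lemma pv_mem_strip_colon (cs : List Char) (h : ':' ∈ cs) : ':' ∈ PySem.Chars.strip cs := by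
  unfold PySem.Chars.strip PySem.Chars.lstrip PySem.Chars.rstrip
  have h1 : ':' ∈ cs.dropWhile PySem.Chars.isspace :=
    pv_mem_dropWhile _ _ _ pv_isspace_colon h
  rw [List.mem_reverse]
  exact pv_mem_dropWhile _ _ _ pv_isspace_colon (by simpa using h1)

lemma pv_strip_mem (cs : List Char) (x : Char) (h : x ∈ PySem.Chars.strip cs) : x ∈ cs := by
  unfold PySem.Chars.strip PySem.Chars.lstrip PySem.Chars.rstrip at h
  rw [List.mem_reverse] at h
  have h1 := (List.dropWhile_sublist (l := (cs.dropWhile PySem.Chars.isspace).reverse)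
    (p := PySem.Chars.isspace)).mem h
  rw [List.mem_reverse] at h1
  exact (List.dropWhile_sublist (l := cs) (p := PySem.Chars.isspace)).mem h1

-- the key/value of a colon chunk, computed on the raw chunk and on its stripped form
lemma pv_colon_decomp (cs : List Char) (h : ':' ∈ cs) :
    cs = cs.takeWhile (fun c => c != ':') ++ ':' :: (cs.dropWhile (fun c => c != ':')).tail := by
  set q : Char → Bool := fun c => c != ':' with hq
  have hd : cs.dropWhile q ≠ [] := by
    intro hnil
    have := List.dropWhile_eq_nil_iff.mp hnil ':' h
    simp [hq] at this
  obtain ⟨x, xs, hdrop⟩ : ∃ x xs, cs.dropWhile q = x :: xs := by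
    cases hdd : cs.dropWhile q with
    | nil => exact absurd hdd hd
    | cons x xs => exact ⟨x, xs, rfl⟩
  have hx : x = ':' := by
    have h2 := List.head_dropWhile_not q (l := cs) hd
    have h3 : (List.dropWhile q cs).head hd = x := by
      have h4 : some ((List.dropWhile q cs).head hd) = some x := by
        rw [← List.head?_eq_head, hdrop]
        rfl
      exact Option.some.inj h4
    rw [h3] at h2
    simpa [hq] using h2
  subst hx
  conv_lhs => rw [← List.takeWhile_append_dropWhile (p := q) (l := cs)]
  rw [hdrop]
  rfl

lemma pv_key_eq (cs : List Char) (h : ':' ∈ cs) :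
    PySem.Chars.strip ((PySem.Chars.strip cs).takeWhile (fun c => c != ':'))
      = PySem.Chars.strip (cs.takeWhile (fun c => c != ':')) := by
  set q : Char → Bool := fun c => c != ':' with hq
  set a := cs.takeWhile q with ha
  set b := (cs.dropWhile q).tail with hb
  have hcs : cs = a ++ ':' :: b := pv_colon_decomp cs h
  have haq : ∀ x ∈ a, q x = true := fun x hx => List.mem_takeWhile_imp hx
  have hstrip : PySem.Chars.strip cs = PySem.Chars.lstrip a ++ ':' :: PySem.Chars.rstrip b := by
    rw [hcs]
    unfold PySem.Chars.strip
    rw [pv_lstrip_append_colon, pv_rstrip_append_colon]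
  have hla : ∀ x ∈ PySem.Chars.lstrip a, q x = true := by
    intro x hx
    exact haq x ((List.dropWhile_sublist (l := a) (p := PySem.Chars.isspace)).mem hx)
  rw [hstrip, pv_takeWhile_append_all q _ _ ':' (by simp [hq]) hla, pv_strip_lstrip]

lemma pv_val_eq (cs : List Char) (h : ':' ∈ cs) :
    PySem.Chars.strip (((PySem.Chars.strip cs).dropWhile (fun c => c != ':')).tail)
      = PySem.Chars.strip ((cs.dropWhile (fun c => c != ':')).tail) := by
  set q : Char → Bool := fun c => c != ':' with hq
  set a := cs.takeWhile q with ha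
  set b := (cs.dropWhile q).tail with hb
  have hcs : cs = a ++ ':' :: b := pv_colon_decomp cs h
  have haq : ∀ x ∈ a, q x = true := fun x hx => List.mem_takeWhile_imp hx
  have hstrip : PySem.Chars.strip cs = PySem.Chars.lstrip a ++ ':' :: PySem.Chars.rstrip b := by
    rw [hcs]
    unfold PySem.Chars.strip
    rw [pv_lstrip_append_colon, pv_rstrip_append_colon]
  have hla : ∀ x ∈ PySem.Chars.lstrip a, q x = true := by
    intro x hx
    exact haq x ((List.dropWhile_sublist (l := a) (p := PySem.Chars.isspace)).mem hx)
  rw [hstrip, pv_dropWhile_append_all q _ _ ':' (by simp [hq]) hla]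
  simp only [List.tail_cons]
  rw [pv_strip_rstrip]

-- scanner characterization on a single chunk
lemma pv_scan_colon_true (cs k v : List Char) :
    cs.foldl ppmB_scan1 (k, v, true) = (k, v ++ cs, true) := by
  induction cs generalizing v with
  | nil => simp
  | cons c cs ih =>
    have h1 : ppmB_scan1 (k, v, true) c = (k, v ++ [c], true) := by simp [ppmB_scan1]
    rw [List.foldl_cons, h1, ih]
    simp

lemma pv_scan_chunk (cs k v : List Char) :
    cs.foldl ppmB_scan1 (k, v, false)
      = if ':' ∈ cs then
          (k ++ cs.takeWhile (fun c => c != ':'), v ++ (cs.dropWhile (fun c => c != ':')).tail, true)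
        else (k ++ cs, v, false) := by
  induction cs generalizing k with
  | nil => simp
  | cons c cs ih =>
    by_cases hc : c = ':'
    · subst hc
      have h1 : ppmB_scan1 (k, v, false) ':' = (k, v, true) := by simp [ppmB_scan1]
      rw [List.foldl_cons, h1, pv_scan_colon_true]
      simp [List.takeWhile_cons, List.dropWhile_cons]
    · have h1 : ppmB_scan1 (k, v, false) c = (k ++ [c], v, false) := by simp [ppmB_scan1, hc]
      rw [List.foldl_cons, h1, ih]
      have hmem : (':' ∈ c :: cs) = (':' ∈ cs) := by simp [eq_comm, hc]
      by_cases hm : ':' ∈ cs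
      · simp [hm, hmem, List.takeWhile_cons, List.dropWhile_cons, hc]
      · simp [hm, hmem, hc]

-- per-chunk agreement of the scanner flush with A's chunk body
lemma pv_chunk_agree (o : PySem.Dict String String) (cs : List Char)
    (hpre : PySem.Str.strip (String.ofList cs) = ""
      ∨ PySem.Str.isIn ":" (PySem.Str.strip (String.ofList cs)) = true) :
    ppmB_flush o (cs.foldl ppmB_scan1 ([], [], false)) = ppmA_body o (String.ofList cs) := by
  have hcolon : ":".toList = [':'] := by decide
  have hstr : PySem.Str.strip (String.ofList cs) = String.ofList (PySem.Chars.strip cs) := by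
    simp [PySem.Str.strip]
  by_cases h : ':' ∈ cs
  · -- colon chunk: both insert the same key/value
    have hmemstrip : ':' ∈ PySem.Chars.strip cs := pv_mem_strip_colon cs h
    have hne : PySem.Chars.strip cs ≠ [] := by
      intro hnil; rw [hnil] at hmemstrip; simp at hmemstrip
    have hnstr : PySem.Str.strip (String.ofList cs) ≠ "" := by
      rw [hstr]
      intro heq
      have := congrArg String.toList heq
      simp at this
      exact hne this
    have hisin : PySem.Str.isIn ":" (PySem.Str.strip (String.ofList cs)) = true := by
      rw [hstr]
      show PySem.Chars.isIn ":".toList (String.ofList (PySem.Chars.strip cs)).toList = true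
      rw [hcolon]
      simp only [String.toList_ofList]
      rw [PySem.Chars.isIn_iff_infix]
      obtain ⟨s1, t1, hst⟩ := List.append_of_mem hmemstrip
      exact ⟨s1, t1, by rw [hst]; simp⟩
    have hsplit : pySplit2 (PySem.Str.strip (String.ofList cs))
        = (String.ofList ((PySem.Chars.strip cs).takeWhile (fun c => c != ':')),
           String.ofList (((PySem.Chars.strip cs).dropWhile (fun c => c != ':')).tail)) := by
      unfold pySplit2
      rw [hstr]
      show (match PySem.Str.splitMax? (String.ofList (PySem.Chars.strip cs)) ":" 1 with
        | some (m :: p :: _) => (m, p) | _ => (String.ofList (PySem.Chars.strip cs), "")) = _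
      rw [PySem.Str.splitMax?]
      simp only [String.toList_ofList]
      rw [PySem.Chars.splitMax?, hcolon]
      rw [if_neg (by decide)]
      rw [pv_splitOnMax_colon _ hmemstrip]
      rfl
    rw [ppmA_body]
    simp only [if_neg hnstr, hisin]
    rw [if_neg (show ¬ (true = false) by simp)]
    rw [pv_scan_chunk]
    simp only [h, if_true, List.nil_append]
    rw [hsplit]
    have hk := pv_key_eq cs h
    have hv := pv_val_eq cs h
    simp only [ppmB_flush, PySem.Str.strip, String.toList_ofList]
    rw [hk, hv]
    simp
  · -- no colon: Pre_ forces the chunk to strip empty; both sides keep o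
    have hnin : PySem.Str.isIn ":" (PySem.Str.strip (String.ofList cs)) ≠ true := by
      rw [hstr]
      show PySem.Chars.isIn ":".toList (String.ofList (PySem.Chars.strip cs)).toList ≠ true
      rw [hcolon]
      simp only [String.toList_ofList]
      intro hcon
      rw [PySem.Chars.isIn_iff_infix] at hcon
      obtain ⟨s1, t1, hst⟩ := hcon
      have hmem : ':' ∈ PySem.Chars.strip cs := by
        rw [← hst]
        simp
      exact h (pv_strip_mem cs ':' hmem)
    have hempty : PySem.Str.strip (String.ofList cs) = "" := by
      rcases hpre with h1 | h2
      · exact h1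
      · exact absurd h2 hnin
    rw [ppmA_body]
    simp only [hempty, if_true]
    rw [pv_scan_chunk]
    simp [h, ppmB_flush]

-- the chunk-list processors behind the scanner fold
def pvProcRest (o : PySem.Dict String String) (chs : List (List Char)) : PySem.Dict String String :=
  chs.foldl (fun o cs => ppmB_flush o (cs.foldl ppmB_scan1 ([], [], false))) o

def pvProcFrom (o : PySem.Dict String String) (kvc : List Char × List Char × Bool)
    (chs : List (List Char)) : PySem.Dict String String :=
  match chs with
  | [] => o
  | h :: t => pvProcRest (ppmB_flush o (h.foldl ppmB_scan1 kvc)) t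

lemma pv_scanner_fold (l : List Char) (o : PySem.Dict String String)
    (kvc : List Char × List Char × Bool) :
    (l ++ [',']).foldl ppmB_step (o, kvc) = (pvProcFrom o kvc (pvSplit1 l), ([], [], false)) := by
  induction l generalizing o kvc with
  | nil =>
    simp only [List.nil_append, List.foldl_cons, List.foldl_nil, ppmB_step, if_true]
    simp [pvSplit1, pvProcFrom, pvProcRest]
  | cons c rest ih =>
    by_cases hc : c = ','
    · subst hc
      simp only [List.cons_append, List.foldl_cons, ppmB_step, if_true]
      rw [ih]
      simp only [pvSplit1, if_true]
      cases hs : pvSplit1 rest with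
      | nil => exact absurd hs (pvSplit1_ne_nil rest)
      | cons h t =>
        simp [pvProcFrom, pvProcRest]
    · simp only [List.cons_append, List.foldl_cons, ppmB_step, if_neg hc]
      rw [ih]
      simp only [pvSplit1, if_neg hc]
      cases hs : pvSplit1 rest with
      | nil => exact absurd hs (pvSplit1_ne_nil rest)
      | cons h t =>
        simp [pvProcFrom, pvProcRest, List.modifyHead]

-- B's default fill is A's setdefault, pointwise
lemma pv_fill_eq_setdefault (d : PySem.Dict String String) (m dp : String) :
    (if d.contains m = true then d else d.insert m dp) = d.setdefault m dp := by
  by_cases hc : d.contains m = true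
  · rw [if_pos hc, PySem.Dict.setdefault_of_contains d dp hc]
  · have hc' : d.contains m = false := by revert hc; cases d.contains m <;> simp
    rw [if_neg hc, PySem.Dict.setdefault_of_not_contains d dp hc']

-- a fold inserting a constant value equals the setdefault fold (all stored values are dp)
lemma pv_insert_const_eq_setdefault (dp : String) (xs : List String) (d : PySem.Dict String String)
    (h : ∀ p ∈ d.items, p.2 = dp) :
    xs.foldl (fun d m => d.insert m dp) d = xs.foldl (fun d m => d.setdefault m dp) d := by
  induction xs generalizing d with
  | nil => rfl
  | cons m xs ih =>
    by_cases hc : d.contains m = true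
    · have hins : d.insert m dp = d := by
        apply PySem.Dict.ext
        rw [PySem.Dict.items_insert_of_contains d dp hc]
        conv_rhs => rw [← List.map_id d.items]
        apply List.map_congr_left
        intro p hp
        by_cases hk : (p.1 == m) = true
        · simp only [hk, if_true]
          have : p = (p.1, p.2) := rfl
          rw [this, h p hp, eq_of_beq hk]; rfl
        · simp [hk]
      rw [List.foldl_cons, List.foldl_cons, hins, PySem.Dict.setdefault_of_contains d dp hc,
        ih d h]
    · have hc' : d.contains m = false := by revert hc; cases d.contains m <;> simp
      rw [List.foldl_cons, List.foldl_cons, PySem.Dict.setdefault_of_not_contains d dp hc']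
      have hitems : (d.insert m dp).items = d.items ++ [(m, dp)] :=
        PySem.Dict.items_insert_of_not_contains d dp hc'
      apply ih
      intro p hp
      rw [hitems] at hp
      rcases List.mem_append.mp hp with h1 | h2
      · exact h p h1
      · simp at h2; rw [h2]

-- the falsy-s case: A's dict comprehension equals B's fill loop from the empty dict
lemma pv_empty_case (models : List String) (dp : String) :
    (PySem.Dict.ofList (models.map (fun m => (m, dp)))).items
      = (models.foldl (fun d m => if d.contains m = true then d else d.insert m dp)
          PySem.Dict.empty).items := by
  have h1 : PySem.Dict.ofList (models.map (fun m => (m, dp)))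
      = models.foldl (fun d m => d.insert m dp) PySem.Dict.empty := by
    unfold PySem.Dict.ofList PySem.Dict.update
    rw [List.foldl_map]
  rw [h1, pv_insert_const_eq_setdefault dp models PySem.Dict.empty (by simp [PySem.Dict.empty])]
  congr 1
  exact (PySem.List.foldl_congr_mem models _ _ PySem.Dict.empty
    (fun acc x _ => pv_fill_eq_setdefault acc x dp)).symm

-- ===== VERDICT (by name: the statement is the Claim_ definition above) =====
theorem parse_provider_map_spec : Claim_equal_parse_provider_map := by
  intro s models dp _ hpre
  unfold Spec_parse_provider_map
  cases s with
  | none =>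
    simp only [parse_provider_map, parse_provider_map_alt]
    exact pv_empty_case models dp
  | some str =>
    by_cases hstr : str = ""
    · subst hstr
      simp only [parse_provider_map, parse_provider_map_alt, if_true]
      exact pv_empty_case models dp
    · have hpre' : ∀ c ∈ (PySem.Str.split? str ",").getD [],
          PySem.Str.strip c = "" ∨ PySem.Str.isIn ":" (PySem.Str.strip c) = true := by
        rcases hpre with h1 | h2
        · exact absurd h1 hstr
        · exact h2
      simp only [parse_provider_map, parse_provider_map_alt, if_neg hstr]
      -- identify the chunk lists on both sides
      have hchunks : (PySem.Str.split? str ",").getD []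
          = (pvSplit1 str.toList).map String.ofList := by
        rw [PySem.Str.split?]
        show (Option.map (List.map String.ofList)
          (PySem.Chars.split? str.toList ",".toList)).getD [] = _
        rw [PySem.Chars.split?]
        rw [if_neg (by simp [List.isEmpty])]
        show ((PySem.Chars.splitOn str.toList [',']).map String.ofList) = _
        rw [pv_splitOn_comma]
      -- B's scanner fold over the chunk list
      have hB : ((str.toList ++ [',']).foldl ppmB_step (PySem.Dict.empty, ([], [], false))).1
          = pvProcRest PySem.Dict.empty (pvSplit1 str.toList) := by
        rw [pv_scanner_fold]
        cases hs : pvSplit1 str.toList with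
        | nil => exact absurd hs (pvSplit1_ne_nil str.toList)
        | cons h t => simp [pvProcFrom, pvProcRest]
      -- out dicts agree chunk by chunk
      have hout : ((PySem.Str.split? str ",").getD []).foldl ppmA_body PySem.Dict.empty
          = ((str.toList ++ [',']).foldl ppmB_step (PySem.Dict.empty, ([], [], false))).1 := by
        rw [hB, hchunks, List.foldl_map, pvProcRest]
        apply PySem.List.foldl_congr_mem
        intro acc cs hcs
        refine (pv_chunk_agree acc cs ?_).symm
        have : String.ofList cs ∈ (PySem.Str.split? str ",").getD [] := by
          rw [hchunks]; exact List.mem_map_of_mem hcs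
        exact hpre' _ this
      rw [hout]
      congr 1
      exact PySem.List.foldl_congr_mem models _ _ _
        (fun acc x _ => (pv_fill_eq_setdefault acc x dp).symm)
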